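-- pv_equiv track=rewrite | github.com/RATHOD-SHUBHAM/DataStructure-And-Algorithm | LeetCode/Array/Bit Manipulation/Hamming Distance/1722. Minimize Hamming Distance After Swap Operations/sol.py | manhatten_dist
-- ===== SOURCE A (Python) =====
-- from collections import Counter, defaultdict
--
-- def manhatten_dist(indexes, source, target):
--     diff = 0
--     source_target_diff = 0 # how many elements are different from source
--     target_source_diff = 0 # how many elements are different from target
--
--     source_counter = Counter()
--     target_counter = Counter()
--
--     # count the numbers
--     for index in indexes:
--         source_counter[source[index]] += 1
--         target_counter[target[index]] += 1
--
--     # sum of surce and target and then their difference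
--     source_target_diff = (source_counter - target_counter).total()
--     target_source_diff = (target_counter - source_counter).total()
--
--     # get the total difference
--     diff += (source_target_diff + target_source_diff) // 2
--
--     return diff
-- ===== SOURCE B (Python) =====
-- def manhatten_dist(indexes, source, target):
--     s = sorted(source[i] for i in indexes)
--     t = sorted(target[i] for i in indexes)
--     i = j = matches = 0
--     while i < len(s) and j < len(t):
--         if s[i] == t[j]:
--             matches += 1
--             i += 1
--             j += 1
--         elif s[i] < t[j]:
--             i += 1
--         else:
--             j += 1
--     return len(s) - matches
-- ===== Notes on version B (the rewrite author's own statement) =====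
-- stated objective: alternative
-- what changed: Replaces the two Counters and double multiset subtraction by sorting the two value groups and counting matches with a two-pointer merge; the answer is the group size minus the multiset-intersection size found by the merge.
import Mathlib
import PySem

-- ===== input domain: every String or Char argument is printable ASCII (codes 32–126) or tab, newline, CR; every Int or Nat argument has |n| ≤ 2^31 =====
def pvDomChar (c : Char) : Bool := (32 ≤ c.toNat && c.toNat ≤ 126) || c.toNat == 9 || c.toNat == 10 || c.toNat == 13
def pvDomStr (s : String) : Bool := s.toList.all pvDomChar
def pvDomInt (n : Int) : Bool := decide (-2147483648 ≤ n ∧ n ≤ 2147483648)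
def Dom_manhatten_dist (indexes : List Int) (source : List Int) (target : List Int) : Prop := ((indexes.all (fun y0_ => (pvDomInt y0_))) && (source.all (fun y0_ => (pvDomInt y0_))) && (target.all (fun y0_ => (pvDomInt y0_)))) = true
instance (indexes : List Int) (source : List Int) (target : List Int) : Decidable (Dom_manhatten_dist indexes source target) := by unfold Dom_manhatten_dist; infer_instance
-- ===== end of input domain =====

-- B replaces A's two Counters and double multiset subtraction by sorting both value groups and
-- counting matches with a two-pointer merge (objective: alternative algorithm).

-- ===== PORT A =====
-- Counter.__sub__ (CPython): keep self's keys with positive count-difference, then other's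
-- keys missing from self whose count is negative (exact transliteration of CPython's two loops).
def pvCounterSub (a b : PySem.Dict Int Int) : PySem.Dict Int Int :=
  let r := a.items.foldl (fun r kv =>
      let newcount := kv.2 - b.getD kv.1 0
      if 0 < newcount then r.insert kv.1 newcount else r) PySem.Dict.empty
  b.items.foldl (fun r kv =>
      if a.contains kv.1 = false ∧ kv.2 < 0 then r.insert kv.1 (0 - kv.2) else r) r

def manhatten_dist (indexes : List Int) (source : List Int) (target : List Int) : Int :=
  let counters := indexes.foldl
    (fun (p : PySem.Dict Int Int × PySem.Dict Int Int) index =>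
      (p.1.modify (PySem.List.pyGetD source index 0) 0 (· + 1),
       p.2.modify (PySem.List.pyGetD target index 0) 0 (· + 1)))
    (PySem.Dict.empty, PySem.Dict.empty)
  let source_target_diff := (pvCounterSub counters.1 counters.2).values.sum
  let target_source_diff := (pvCounterSub counters.2 counters.1).values.sum
  0 + PySem.Int.floordiv (source_target_diff + target_source_diff) 2

-- ===== PORT B =====
-- B's while loop over indices i, j counting matches, transcribed as the structural recursion
-- on the two remaining suffixes (same comparisons in the same order).
def pvMatchCount : List Int → List Int → Nat
  | [], _ => 0
  | _ :: _, [] => 0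
  | a :: s, b :: t =>
    if a = b then pvMatchCount s t + 1
    else if a < b then pvMatchCount s (b :: t)
    else pvMatchCount (a :: s) t
termination_by s t => s.length + t.length

def manhatten_dist_alt (indexes : List Int) (source : List Int) (target : List Int) : Int :=
  let s := PySem.List.sorted (indexes.map (fun i => PySem.List.pyGetD source i 0)) (fun x => x) false
  let t := PySem.List.sorted (indexes.map (fun i => PySem.List.pyGetD target i 0)) (fun x => x) false
  (s.length : Int) - (pvMatchCount s t : Int)

-- ===== PRECONDITION & SPEC =====
-- Pre_: every index is a valid Python index into both lists (otherwise A raises IndexError).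
def Pre_manhatten_dist (indexes : List Int) (source : List Int) (target : List Int) : Prop :=
  ∀ i ∈ indexes, PySem.Raise.InRange source.length i ∧ PySem.Raise.InRange target.length i
instance (indexes : List Int) (source : List Int) (target : List Int) : Decidable (Pre_manhatten_dist indexes source target) := by unfold Pre_manhatten_dist; infer_instance

def pvWitness_manhatten_dist : List Int × List Int × List Int := ([0, 1, -1], [1, 2], [2, 1])

def Spec_manhatten_dist (indexes : List Int) (source : List Int) (target : List Int) (out : Int) : Prop := out = manhatten_dist_alt indexes source target
instance (indexes : List Int) (source : List Int) (target : List Int) (out : Int) : Decidable (Spec_manhatten_dist indexes source target out) := by unfold Spec_manhatten_dist; infer_instance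

-- ===== CLAIM (what is proved, stated in full; the proofs are below) =====
def Claim_equal_manhatten_dist : Prop := ∀ (indexes : List Int) (source : List Int) (target : List Int), Dom_manhatten_dist indexes source target → Pre_manhatten_dist indexes source target → Spec_manhatten_dist indexes source target (manhatten_dist indexes source target)

-- ===== LEMMAS AND PROOFS =====

-- positive part, the common abstraction of both programs' aggregations
def pvPos (x : Int) : Int := max x 0

theorem pv_foldl_id {α β : Type} (l : List α) (f : β → α → β) (init : β)
    (h : ∀ acc x, x ∈ l → f acc x = acc) : l.foldl f init = init := by
  induction l generalizing init with
  | nil => rfl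
  | cons a l ih =>
    rw [List.foldl_cons, h init a List.mem_cons_self]
    exact ih init (fun acc x hx => h acc x (List.mem_cons_of_mem _ hx))

-- A's first Counter.__sub__ loop, abstracted to a fold over distinct keys
theorem pv_subfold_sum (K : List Int) (v : Int → Int) (r : PySem.Dict Int Int)
    (hK : K.Nodup) (hr : r.keys.Nodup) (hd : ∀ k ∈ K, r.contains k = false) :
    (K.foldl (fun r k => if 0 < v k then r.insert k (v k) else r) r).values.sum
      = r.values.sum + (K.map (fun k => pvPos (v k))).sum := by
  induction K generalizing r with
  | nil => simp
  | cons a K ih =>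
    simp only [List.foldl_cons, List.map_cons, List.sum_cons]
    rcases List.nodup_cons.mp hK with ⟨ha, hK'⟩
    by_cases hv : 0 < v a
    · rw [if_pos hv]
      rw [ih _ hK' (PySem.Dict.nodup_keys_insert r a (v a) hr)
        (by intro k hk
            rw [PySem.Dict.contains_insert]
            have : (k == a) = false := by simp; rintro rfl; exact ha hk
            simp [this, hd k (List.mem_cons_of_mem _ hk)])]
      have hins : (r.insert a (v a)).values.sum = r.values.sum + v a := by
        have := PySem.Dict.items_insert_of_not_contains (d := r) (k := a) (v := v a)
          (hd a List.mem_cons_self)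
        simp [PySem.Dict.values, this]
      rw [hins]
      have : pvPos (v a) = v a := by unfold pvPos; omega
      omega
    · rw [if_neg hv]
      rw [ih _ hK' hr (fun k hk => hd k (List.mem_cons_of_mem _ hk))]
      have : pvPos (v a) = 0 := by unfold pvPos; omega
      omega

-- total of Counter(s) - Counter(t): A's second __sub__ loop never fires (counts are ≥ 0)
theorem pv_sub_total (s t : List Int) :
    (pvCounterSub (PySem.Dict.counter s) (PySem.Dict.counter t)).values.sum
      = ((PySem.Set.ofList s).map (fun k => pvPos ((s.count k : Int) - (t.count k : Int)))).sum := by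
  unfold pvCounterSub
  simp only []
  rw [pv_foldl_id _ _ _ (by
    intro acc x hx
    rw [PySem.Dict.items_counter] at hx
    obtain ⟨k, hk, rfl⟩ := List.mem_map.mp hx
    have h0 : ¬ ((t.count k : Int) < 0) := by omega
    simp [h0])]
  rw [PySem.Dict.items_counter, List.foldl_map]
  rw [pv_subfold_sum (PySem.Set.ofList s)
        (fun k => (s.count k : Int) - (PySem.Dict.counter t).getD k 0) _
        (PySem.Set.nodup_ofList s) (by simp [PySem.Dict.keys_empty])
        (by intro k _; simp [PySem.Dict.contains_empty])]
  simp [PySem.Dict.getD_counter, PySem.Dict.values, PySem.Dict.empty]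

-- sum of pvPos (s.count - t.count) over any nodup key list covering s, as a Finset sum
theorem pv_sum_to_finset (K : List Int) (s t : List Int) (hK : K.Nodup)
    (hmem : ∀ k, k ∈ s → k ∈ K) (hsub : ∀ k, k ∈ K → k ∈ s ∨ k ∈ t) :
    (K.map (fun k => pvPos ((s.count k : Int) - (t.count k : Int)))).sum
      = ∑ x ∈ (s ++ t).toFinset, pvPos ((s.count x : Int) - (t.count x : Int)) := by
  rw [← List.sum_toFinset _ hK]
  apply Finset.sum_subset
  · intro x hx
    simp only [List.mem_toFinset, List.mem_append] at *
    exact hsub x hx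
  · intro x _ hx
    simp only [List.mem_toFinset] at hx
    have h0 : s.count x = 0 := List.count_eq_zero_of_not_mem (fun h => hx (hmem x h))
    have h1 : (0 : Int) ≤ (t.count x : Int) := by omega
    unfold pvPos
    omega

-- the two-pointer merge over two sorted lists counts the multiset intersection
theorem pv_match_eq_inter (s t : List Int)
    (hs : s.Pairwise (· ≤ ·)) (ht : t.Pairwise (· ≤ ·)) :
    pvMatchCount s t = Multiset.card ((s : Multiset Int) ∩ (t : Multiset Int)) := by
  induction s generalizing t with
  | nil => simp [pvMatchCount]
  | cons a s ih =>
    induction t with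
    | nil => simp [pvMatchCount]
    | cons b t iht =>
      rcases List.pairwise_cons.mp hs with ⟨has, hs'⟩
      rcases List.pairwise_cons.mp ht with ⟨hbt, ht'⟩
      rw [pvMatchCount]
      by_cases hab : a = b
      · subst hab
        rw [if_pos rfl]
        have : ((a :: s : List Int) : Multiset Int) ∩ ((a :: t : List Int) : Multiset Int)
            = a ::ₘ ((s : Multiset Int) ∩ (t : Multiset Int)) := by
          rw [← Multiset.cons_coe, ← Multiset.cons_coe,
            Multiset.cons_inter_of_pos _ (by simp)]
          simp
        rw [this, Multiset.card_cons, ih t hs' ht']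
      · rw [if_neg hab]
        by_cases hlt : a < b
        · rw [if_pos hlt]
          have hna : a ∉ b :: t := by
            intro h
            rcases List.mem_cons.mp h with h | h
            · exact hab h
            · exact absurd (hbt a h) (by omega)
          have : ((a :: s : List Int) : Multiset Int) ∩ ((b :: t : List Int) : Multiset Int)
              = (s : Multiset Int) ∩ ((b :: t : List Int) : Multiset Int) := by
            rw [← Multiset.cons_coe, Multiset.cons_inter_of_neg _ (by simpa using hna)]
          rw [this, ih (b :: t) hs' ht]
        · rw [if_neg hlt]
          have hnb : b ∉ a :: s := by
            intro h
            rcases List.mem_cons.mp h with h | h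
            · exact hab h.symm
            · exact absurd (has b h) (by omega)
          have : ((a :: s : List Int) : Multiset Int) ∩ ((b :: t : List Int) : Multiset Int)
              = ((a :: s : List Int) : Multiset Int) ∩ (t : Multiset Int) := by
            rw [Multiset.inter_comm, ← Multiset.cons_coe,
              Multiset.cons_inter_of_neg _ (by simpa using hnb), Multiset.inter_comm]
          rw [this, iht ht']

-- Σ count over the union finset is the length
theorem pv_hcount (u w : List Int) :
    (∑ x ∈ (u ++ w).toFinset, (u.count x : Int)) = u.length := by
  rw [show ((u.length : Int)) = ((∑ x ∈ u.toFinset, u.count x : Nat) : Int) by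
    rw [List.sum_toFinset_count_eq_length]]
  push_cast
  symm
  apply Finset.sum_subset
  · intro x hx
    simp only [List.mem_toFinset, List.mem_append] at *
    exact Or.inl hx
  · intro x _ hx
    simp only [List.mem_toFinset] at hx
    simp [List.count_eq_zero_of_not_mem hx]

-- the positive-part sum equals length minus the multiset-intersection size
theorem pv_pos_sum (s t : List Int) :
    (∑ x ∈ (s ++ t).toFinset, pvPos ((s.count x : Int) - (t.count x : Int)))
      = (s.length : Int) - (Multiset.card ((s : Multiset Int) ∩ (t : Multiset Int)) : Int) := by
  have hstep : ∀ x, pvPos ((s.count x : Int) - (t.count x : Int))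
      = (s.count x : Int) - (min (s.count x) (t.count x) : Nat) := by
    intro x
    unfold pvPos
    have := Nat.min_le_left (s.count x) (t.count x)
    have := Nat.min_le_right (s.count x) (t.count x)
    rcases Nat.le_total (s.count x) (t.count x) with h | h <;> push_cast <;> omega
  calc (∑ x ∈ (s ++ t).toFinset, pvPos ((s.count x : Int) - (t.count x : Int)))
      = ∑ x ∈ (s ++ t).toFinset, ((s.count x : Int) - (min (s.count x) (t.count x) : Nat)) := by
        exact Finset.sum_congr rfl (fun x _ => hstep x)
    _ = (∑ x ∈ (s ++ t).toFinset, (s.count x : Int))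
        - ∑ x ∈ (s ++ t).toFinset, ((min (s.count x) (t.count x) : Nat) : Int) := by
        rw [Finset.sum_sub_distrib]
    _ = (s.length : Int) - (Multiset.card ((s : Multiset Int) ∩ (t : Multiset Int)) : Int) := by
        rw [pv_hcount s t]
        congr 1
        have : ∀ x, ((min (s.count x) (t.count x) : Nat) : Int)
            = (Multiset.count x ((s : Multiset Int) ∩ (t : Multiset Int)) : Int) := by
          intro x
          rw [Multiset.count_inter]
          simp
        rw [Finset.sum_congr rfl (fun x _ => this x)]
        rw [show (Multiset.card ((s : Multiset Int) ∩ (t : Multiset Int)) : Int)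
            = ((∑ x ∈ ((s : Multiset Int) ∩ (t : Multiset Int)).toFinset,
                Multiset.count x ((s : Multiset Int) ∩ (t : Multiset Int)) : Nat) : Int) by
          rw [Multiset.toFinset_sum_count_eq]]
        rw [Nat.cast_sum]
        have hsub : ((s : Multiset Int) ∩ (t : Multiset Int)).toFinset ⊆ (s ++ t).toFinset := by
          intro x hx
          rw [Multiset.mem_toFinset, Multiset.mem_inter] at hx
          rw [List.mem_toFinset, List.mem_append]
          exact Or.inl (Multiset.mem_coe.mp hx.1)
        exact (Finset.sum_subset hsub (by
          intro x _ hx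
          rw [Multiset.mem_toFinset] at hx
          rw [Multiset.count_eq_zero.mpr hx]
          rfl)).symm

-- ===== VERDICT (by name: the statement is the Claim_ definition above) =====
theorem manhatten_dist_spec : Claim_equal_manhatten_dist := by
  intro indexes source target _ _
  unfold Spec_manhatten_dist manhatten_dist manhatten_dist_alt
  simp only []
  rw [PySem.List.foldl_prod_mk
    (f := fun (d : PySem.Dict Int Int) index => d.modify (PySem.List.pyGetD source index 0) 0 (· + 1))
    (g := fun (d : PySem.Dict Int Int) index => d.modify (PySem.List.pyGetD target index 0) 0 (· + 1))]
  have hs : indexes.foldl (fun (d : PySem.Dict Int Int) index => d.modify (PySem.List.pyGetD source index 0) 0 (· + 1)) PySem.Dict.empty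
      = PySem.Dict.counter (indexes.map (fun i => PySem.List.pyGetD source i 0)) := by
    rw [PySem.Dict.counter_eq_foldl, List.foldl_map]
  have ht : indexes.foldl (fun (d : PySem.Dict Int Int) index => d.modify (PySem.List.pyGetD target index 0) 0 (· + 1)) PySem.Dict.empty
      = PySem.Dict.counter (indexes.map (fun i => PySem.List.pyGetD target i 0)) := by
    rw [PySem.Dict.counter_eq_foldl, List.foldl_map]
  rw [hs, ht]
  set s := indexes.map (fun i => PySem.List.pyGetD source i 0) with hsdef
  set t := indexes.map (fun i => PySem.List.pyGetD target i 0) with htdef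
  -- A's two totals as Finset sums over the union of values
  rw [pv_sub_total s t, pv_sub_total t s]
  rw [pv_sum_to_finset (PySem.Set.ofList s) s t (PySem.Set.nodup_ofList s)
        (fun k hk => (PySem.Set.mem_ofList _ _).mpr hk)
        (fun k hk => Or.inl ((PySem.Set.mem_ofList _ _).mp hk))]
  have hcomm : (t ++ s).toFinset = (s ++ t).toFinset := by
    ext x; simp only [List.mem_toFinset, List.mem_append]; tauto
  rw [pv_sum_to_finset (PySem.Set.ofList t) t s (PySem.Set.nodup_ofList t)
        (fun k hk => (PySem.Set.mem_ofList _ _).mpr hk)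
        (fun k hk => Or.inl ((PySem.Set.mem_ofList _ _).mp hk)), hcomm]
  -- B's value: sorted lists are permutations, the merge counts the intersection
  set s' := PySem.List.sorted s (fun x => x) false with hs'def
  set t' := PySem.List.sorted t (fun x => x) false with ht'def
  have hps : s'.Perm s := PySem.List.sorted_perm s (fun x => x) false
  have hpt : t'.Perm t := PySem.List.sorted_perm t (fun x => x) false
  have hms : (s' : Multiset Int) = (s : Multiset Int) := Quot.sound hps
  have hmt : (t' : Multiset Int) = (t : Multiset Int) := Quot.sound hpt
  have hmatch : pvMatchCount s' t'
      = Multiset.card ((s : Multiset Int) ∩ (t : Multiset Int)) := by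
    rw [pv_match_eq_inter s' t'
      (by simpa using PySem.List.sorted_pairwise s (fun x => x))
      (by simpa using PySem.List.sorted_pairwise t (fun x => x)), hms, hmt]
  have hlen' : s'.length = s.length := hps.length_eq
  rw [hmatch, hlen']
  -- both positive-part sums in closed form
  rw [pv_pos_sum s t]
  have hst : (∑ x ∈ (s ++ t).toFinset, pvPos ((t.count x : Int) - (s.count x : Int)))
      = (t.length : Int) - (Multiset.card ((t : Multiset Int) ∩ (s : Multiset Int)) : Int) := by
    rw [← hcomm]
    exact pv_pos_sum t s
  rw [hst, Multiset.inter_comm]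
  have hlen : s.length = t.length := by rw [hsdef, htdef]; simp
  rw [PySem.Int.floordiv_eq_ediv_of_pos (by norm_num)]
  omega
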